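-- pv_equiv track=rewrite | github.com/MANGA-UOFA/ED4UCP | library/cyk_variant.py | cyk_variant
-- ===== SOURCE A (Python) =====
-- def cyk_variant(span_scores, length):
--     scores = [[0]*length]
--     spans = [[[]]*length]
--     for level in range(1, length):
--         scores.append([])
--         spans.append([])
--         for begin in range(length-level):
--             end = begin+level
--             this_span = str((begin, end))
--             span_score = span_scores.get(this_span, 0)
--             left, best_sub_score = max(([(left, scores[left][begin]+scores[level-left-1][begin+left+1]) for left in range(level)]), key=lambda x: x[1])
--             score = span_score + best_sub_score
--             new_spans = spans[left][begin] + spans[level-left-1][begin+left+1] + [this_span]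
--             scores[level].append(score)
--             spans[level].append(new_spans)
--     return spans[-1][0]
-- ===== SOURCE B (Python) =====
-- def cyk_variant(span_scores, length):
--     memo = [[None] * length for _ in range(length)]
--
--     def best(begin, level):
--         cached = memo[level][begin]
--         if cached is not None:
--             return cached
--         if level == 0:
--             result = (0, [])
--         else:
--             cands = []
--             for l in range(level):
--                 l_score, l_spans = best(begin, l)
--                 r_score, r_spans = best(begin + l + 1, level - l - 1)
--                 cands.append((l_score + r_score, l_spans, r_spans))
--             best_sub, l_spans, r_spans = max(cands, key=lambda x: x[0])
--             this_span = str((begin, begin + level))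
--             result = (span_scores.get(this_span, 0) + best_sub,
--                       l_spans + r_spans + [this_span])
--         memo[level][begin] = result
--         return result
--
--     return best(0, length - 1)[1]
-- ===== Notes on version B (the rewrite author's own statement) =====
-- stated objective: alternative
-- what changed: Replaces A's bottom-up CYK table (nested level/begin loops appending to growing 2-D lists) with a top-down memoized recursion best(begin, level) over spans that caches each span's (score, spans) result and carries the two sub-span lists with each split candidate instead of re-indexing the tables.
import Mathlib
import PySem

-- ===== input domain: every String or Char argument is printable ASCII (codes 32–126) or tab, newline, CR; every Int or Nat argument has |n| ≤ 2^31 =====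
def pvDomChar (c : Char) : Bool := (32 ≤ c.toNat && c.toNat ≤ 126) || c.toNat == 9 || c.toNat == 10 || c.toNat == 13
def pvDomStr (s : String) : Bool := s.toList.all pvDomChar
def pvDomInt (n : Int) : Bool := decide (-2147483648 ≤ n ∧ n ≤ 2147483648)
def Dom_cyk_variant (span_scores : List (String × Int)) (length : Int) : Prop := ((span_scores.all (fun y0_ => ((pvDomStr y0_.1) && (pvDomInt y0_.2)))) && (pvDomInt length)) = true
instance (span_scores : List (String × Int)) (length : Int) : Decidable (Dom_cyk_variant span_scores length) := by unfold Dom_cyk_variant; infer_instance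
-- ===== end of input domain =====

-- B replaces A's bottom-up CYK table with a top-down memoized recursion over (begin, level)
-- spans (objective: alternative decomposition, same asymptotic cost); return value only, no mutation.

-- str((begin, end)) for two ints
def pvSpanStr (b e : Int) : String :=
  "(" ++ PySem.Int.toStr b ++ ", " ++ PySem.Int.toStr e ++ ")"

-- ===== PORT A =====
-- one cell of A's inner loop: (score, new_spans) at (level, begin), reading the previous rows
def pvAcell (d : PySem.Dict String Int) (scores : List (List Int))
    (spans : List (List (List String))) (level b : Int) : Int × List String :=
  let this_span := pvSpanStr b (b + level)
  let span_score := PySem.Dict.getD d this_span 0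
  let cands := (PySem.List.pyRange 0 level 1).map (fun left =>
    (left, PySem.List.pyGetD (PySem.List.pyGetD scores left []) b 0
         + PySem.List.pyGetD (PySem.List.pyGetD scores (level - left - 1) []) (b + left + 1) 0))
  let pick := (PySem.List.max? cands (fun x => x.2)).getD (0, 0)
  let new_spans := PySem.List.pyGetD (PySem.List.pyGetD spans pick.1 []) b []
      ++ PySem.List.pyGetD (PySem.List.pyGetD spans (level - pick.1 - 1) []) (b + pick.1 + 1) []
      ++ [this_span]
  (span_score + pick.2, new_spans)

-- A's inner loop over begin: builds row `level` of scores and spans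
def pvArow (d : PySem.Dict String Int) (scores : List (List Int))
    (spans : List (List (List String))) (length level : Int) :
    List Int × List (List String) :=
  (PySem.List.pyRange 0 (length - level) 1).foldl
    (fun row b =>
      let c := pvAcell d scores spans level b
      (row.1 ++ [c.1], row.2 ++ [c.2]))
    ([], [])

def cyk_variant (span_scores : List (String × Int)) (length : Int) : List String :=
  let d := PySem.Dict.mk span_scores
  let st := (PySem.List.pyRange 1 length 1).foldl
    (fun (st : List (List Int) × List (List (List String))) (level : Int) =>
      let r := pvArow d st.1 st.2 length level
      (st.1 ++ [r.1], st.2 ++ [r.2]))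
    ([List.replicate length.toNat 0], [List.replicate length.toNat []])
  PySem.List.pyGetD (PySem.List.pyGetD st.2 (-1) []) 0 []

-- ===== PORT B =====
-- memo[level][begin] = result  (Source B's list-of-lists cache, threaded explicitly)
def pvMemoSet (memo : List (List (Option (Int × List String)))) (level begin_ : Nat)
    (r : Int × List String) : List (List (Option (Int × List String))) :=
  memo.set level ((memo.getD level []).set begin_ (some r))

-- top-down memoized recursion: pvBestM is Source B's `best`, pvCandsM its candidate loop
mutual
def pvBestM (d : PySem.Dict String Int)
    (memo : List (List (Option (Int × List String)))) (begin_ level : Nat) :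
    (Int × List String) × List (List (Option (Int × List String))) :=
  match (memo.getD level []).getD begin_ none with
  | some cached => (cached, memo)
  | none =>
    if level = 0 then
      let r : Int × List String := (0, [])
      (r, pvMemoSet memo level begin_ r)
    else
      let cm := pvCandsM d memo begin_ level 0
      let pick := (PySem.List.max? cm.1 (fun x => x.1)).getD (0, [], [])
      let this_span := pvSpanStr (begin_ : Int) ((begin_ : Int) + (level : Int))
      let r := (PySem.Dict.getD d this_span 0 + pick.1, pick.2.1 ++ pick.2.2 ++ [this_span])
      (r, pvMemoSet cm.2 level begin_ r)
termination_by (level, 1, 0)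

def pvCandsM (d : PySem.Dict String Int)
    (memo : List (List (Option (Int × List String)))) (begin_ level left : Nat) :
    List (Int × List String × List String) × List (List (Option (Int × List String))) :=
  if h : left < level then
    let lr := pvBestM d memo begin_ left
    let rr := pvBestM d lr.2 (begin_ + left + 1) (level - left - 1)
    let rest := pvCandsM d rr.2 begin_ level (left + 1)
    ((lr.1.1 + rr.1.1, lr.1.2, rr.1.2) :: rest.1, rest.2)
  else ([], memo)
termination_by (level, 0, level - left)
end

def cyk_variant_alt (span_scores : List (String × Int)) (length : Int) : List String :=
  let d := PySem.Dict.mk span_scores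
  let memo := List.replicate length.toNat (List.replicate length.toNat none)
  ((pvBestM d memo 0 (length - 1).toNat).1).2

-- ===== PRECONDITION & SPEC =====
-- Pre_ excludes length ≤ 0, where A raises IndexError (spans[-1][0] on an empty/short table).
def Pre_cyk_variant (span_scores : List (String × Int)) (length : Int) : Prop := 1 ≤ length
instance (span_scores : List (String × Int)) (length : Int) : Decidable (Pre_cyk_variant span_scores length) := by unfold Pre_cyk_variant; infer_instance

def pvWitness_cyk_variant : (List (String × Int)) × Int := ([("(0, 1)", 3), ("(0, 2)", 1)], 3)

def Spec_cyk_variant (span_scores : List (String × Int)) (length : Int) (out : List String) : Prop := out = cyk_variant_alt span_scores length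
instance (span_scores : List (String × Int)) (length : Int) (out : List String) : Decidable (Spec_cyk_variant span_scores length out) := by unfold Spec_cyk_variant; infer_instance

-- ===== CLAIM (what is proved, stated in full; the proofs are below) =====
def Claim_equal_cyk_variant : Prop := ∀ (span_scores : List (String × Int)) (length : Int), Dom_cyk_variant span_scores length → Pre_cyk_variant span_scores length → Spec_cyk_variant span_scores length (cyk_variant span_scores length)

-- ===== LEMMAS AND PROOFS =====

-- pure (memo-free) value of Source B's `best` — the proof-side reference for both ports
mutual
def pvBest (d : PySem.Dict String Int) (begin_ level : Nat) : Int × List String :=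
  if level = 0 then ((0 : Int), ([] : List String))
  else
    let cands := pvCands d begin_ level 0
    let pick := (PySem.List.max? cands (fun c => c.1)).getD (0, [], [])
    let this_span := pvSpanStr (begin_ : Int) ((begin_ : Int) + (level : Int))
    (PySem.Dict.getD d this_span 0 + pick.1, pick.2.1 ++ pick.2.2 ++ [this_span])
termination_by (level, 1, 0)

def pvCands (d : PySem.Dict String Int) (begin_ level left : Nat) :
    List (Int × List String × List String) :=
  if left < level then
    ((pvBest d begin_ left).1 + (pvBest d (begin_ + left + 1) (level - left - 1)).1,
     (pvBest d begin_ left).2, (pvBest d (begin_ + left + 1) (level - left - 1)).2)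
      :: pvCands d begin_ level (left + 1)
  else []
termination_by (level, 0, level - left)
end

-- the memo only ever stores correct values
def pvMemoOK (d : PySem.Dict String Int)
    (memo : List (List (Option (Int × List String)))) : Prop :=
  ∀ b l v, (memo.getD l []).getD b none = some v → v = pvBest d b l

-- writing a correct value into the cache preserves correctness
theorem pvMemoOK_set (d : PySem.Dict String Int)
    (memo : List (List (Option (Int × List String)))) (lv b : Nat)
    (r : Int × List String) (h : pvMemoOK d memo) (hr : r = pvBest d b lv) :
    pvMemoOK d (pvMemoSet memo lv b r) := by
  intro b' l' v hv
  unfold pvMemoSet at hv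
  rw [List.getD_eq_getElem?_getD (l := List.set memo lv _), List.getElem?_set] at hv
  by_cases hl : lv = l'
  · subst hl
    rw [if_pos rfl] at hv
    by_cases hlen : lv < memo.length
    · rw [if_pos hlen] at hv
      simp only [Option.getD_some] at hv
      rw [List.getD_eq_getElem?_getD, List.getElem?_set] at hv
      by_cases hb : b = b'
      · subst hb
        rw [if_pos rfl] at hv
        by_cases hblen : b < (memo.getD lv []).length
        · rw [if_pos hblen] at hv
          simp only [Option.getD_some] at hv
          cases hv
          exact hr
        · rw [if_neg hblen] at hv
          simp at hv
      · rw [if_neg hb, ← List.getD_eq_getElem?_getD] at hv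
        exact h b' lv v hv
    · rw [if_neg hlen] at hv
      simp at hv
  · rw [if_neg hl, ← List.getD_eq_getElem?_getD] at hv
    exact h b' l' v hv

-- pvCands is a map over the remaining split points
theorem pvCands_eq (d : PySem.Dict String Int) (b level : Nat) :
    ∀ (fuel left : Nat), level - left = fuel →
      pvCands d b level left = (List.range' left fuel).map (fun x =>
        ((pvBest d b x).1 + (pvBest d (b + x + 1) (level - x - 1)).1,
         (pvBest d b x).2, (pvBest d (b + x + 1) (level - x - 1)).2)) := by
  intro fuel
  induction fuel with
  | zero =>
    intro left h
    rw [pvCands]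
    have : ¬ left < level := by omega
    simp [this]
  | succ f ih =>
    intro left h
    rw [pvCands]
    have hlt : left < level := by omega
    rw [List.range'_succ]
    simp only [hlt, if_pos, List.map_cons]
    rw [ih (left + 1) (by omega)]

-- pvBest at a positive level, with the candidate loop replaced by its list
theorem pvBest_pos (d : PySem.Dict String Int) (b level : Nat) (h : level ≠ 0) :
    pvBest d b level =
      (let cands := (List.range level).map (fun x =>
          ((pvBest d b x).1 + (pvBest d (b + x + 1) (level - x - 1)).1,
           (pvBest d b x).2, (pvBest d (b + x + 1) (level - x - 1)).2))
       let pick := (PySem.List.max? cands (fun c => c.1)).getD (0, [], [])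
       (PySem.Dict.getD d (pvSpanStr (b : Int) ((b : Int) + (level : Int))) 0 + pick.1,
        pick.2.1 ++ pick.2.2 ++ [pvSpanStr (b : Int) ((b : Int) + (level : Int))])) := by
  rw [pvBest]
  rw [if_neg h, pvCands_eq d b level level 0 (by omega), List.range_eq_range']

mutual
theorem pvBestM_ok (d : PySem.Dict String Int)
    (memo : List (List (Option (Int × List String)))) (b l : Nat)
    (h : pvMemoOK d memo) :
    (pvBestM d memo b l).1 = pvBest d b l ∧ pvMemoOK d (pvBestM d memo b l).2 := by
  rw [pvBestM]
  split
  next v hmem => exact ⟨h b l v hmem, h⟩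
  next hmem =>
    by_cases hl : l = 0
    · rw [if_pos hl]
      subst hl
      have hval : pvBest d b 0 = ((0 : Int), ([] : List String)) := by rw [pvBest]; simp
      exact ⟨hval.symm, pvMemoOK_set d memo 0 b _ h hval.symm⟩
    · have hcm := pvCandsM_ok d memo b l 0 h
      rw [if_neg hl]
      have hval :
          (PySem.Dict.getD d (pvSpanStr (b : Int) ((b : Int) + (l : Int))) 0 +
              ((PySem.List.max? (pvCandsM d memo b l 0).1 (fun x => x.1)).getD (0, [], [])).1,
            ((PySem.List.max? (pvCandsM d memo b l 0).1 (fun x => x.1)).getD (0, [], [])).2.1 ++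
              ((PySem.List.max? (pvCandsM d memo b l 0).1 (fun x => x.1)).getD (0, [], [])).2.2 ++
              [pvSpanStr (b : Int) ((b : Int) + (l : Int))]) = pvBest d b l := by
        rw [pvBest_pos d b l hl, hcm.1]
        simp [List.range_eq_range']
      exact ⟨hval, pvMemoOK_set d (pvCandsM d memo b l 0).2 l b _ hcm.2 hval⟩
termination_by (l, 1, 0)

theorem pvCandsM_ok (d : PySem.Dict String Int)
    (memo : List (List (Option (Int × List String)))) (b level left : Nat)
    (h : pvMemoOK d memo) :
    (pvCandsM d memo b level left).1 =
      (List.range' left (level - left)).map (fun x =>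
        ((pvBest d b x).1 + (pvBest d (b + x + 1) (level - x - 1)).1,
         (pvBest d b x).2, (pvBest d (b + x + 1) (level - x - 1)).2))
    ∧ pvMemoOK d (pvCandsM d memo b level left).2 := by
  rw [pvCandsM]
  by_cases hlt : left < level
  · rw [dif_pos hlt]
    have h1 := pvBestM_ok d memo b left h
    have h2 := pvBestM_ok d (pvBestM d memo b left).2 (b + left + 1) (level - left - 1) h1.2
    have h3 := pvCandsM_ok d
      (pvBestM d (pvBestM d memo b left).2 (b + left + 1) (level - left - 1)).2
      b level (left + 1) h2.2
    have hn : level - left = (level - (left + 1)) + 1 := by omega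
    have hr : List.range' left (level - left) = left :: List.range' (left + 1) (level - (left + 1)) := by
      rw [hn, List.range'_succ]
    rw [hr]
    simp only [List.map_cons]
    exact ⟨by rw [h1.1, h2.1, h3.1], h3.2⟩
  · rw [dif_neg hlt]
    have h0 : level - left = 0 := by omega
    simp [h0, h]
termination_by (level, 0, level - left)
end

-- first-max of a mapped list is the image of the first-max over the underlying keys
theorem pv_max?_map {γ α : Type} (l : List γ) (f : γ → α) (k : α → Int) :
    PySem.List.max? (l.map f) k = (PySem.List.max? l (fun x => k (f x))).map f := by
  unfold PySem.List.max?
  suffices h : ∀ (acc : Option γ),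
      (l.map f).foldl (fun acc x => match acc with
        | none => some x
        | some m => if k m < k x then some x else some m) (acc.map f)
        = (l.foldl (fun acc x => match acc with
        | none => some x
        | some m => if k (f m) < k (f x) then some x else some m) acc).map f by
    simpa using h none
  induction l with
  | nil => intro acc; simp
  | cons x t ih =>
    intro acc
    cases acc with
    | none => simpa using ih (some x)
    | some m =>
      by_cases hc : k (f m) < k (f x) <;> simp [hc] <;>
        [exact ih (some x); exact ih (some m)]

-- row `l` of A's score / span tables
def pvRowS (d : PySem.Dict String Int) (n l : Nat) : List Int :=
  (List.range (n - l)).map (fun b => (pvBest d b l).1)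
def pvRowP (d : PySem.Dict String Int) (n l : Nat) : List (List String) :=
  (List.range (n - l)).map (fun b => (pvBest d b l).2)

theorem pv_foldl_pair_append {γ α β : Type} (xs : List γ) (f : γ → α) (g : γ → β)
    (a : List α) (b : List β) :
    xs.foldl (fun acc x => (acc.1 ++ [f x], acc.2 ++ [g x])) (a, b)
      = (a ++ xs.map f, b ++ xs.map g) := by
  induction xs generalizing a b with
  | nil => simp
  | cons x t ih => simp [ih, List.append_assoc]

-- one cell of A equals pvBest
theorem pvAcell_eq (d : PySem.Dict String Int) (n k b : Nat)
    (hk : 1 ≤ k) (hkb : b + k < n) :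
    pvAcell d ((List.range k).map (pvRowS d n)) ((List.range k).map (pvRowP d n))
        (k : Int) (b : Int) = pvBest d b k := by
  have hS2 : ∀ x c : Nat, x < k → c + x < n →
      PySem.List.pyGetD (pvRowS d n x) (c : Int) 0 = (pvBest d c x).1 := by
    intro x c hx hc
    rw [PySem.List.pyGetD_natCast]
    exact PySem.List.getD_map_range _ _ _ _ (by omega)
  have hP2 : ∀ x c : Nat, x < k → c + x < n →
      PySem.List.pyGetD (pvRowP d n x) (c : Int) [] = (pvBest d c x).2 := by
    intro x c hx hc
    rw [PySem.List.pyGetD_natCast]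
    exact PySem.List.getD_map_range _ _ _ _ (by omega)
  have hS : ∀ x : Nat, x < k →
      PySem.List.pyGetD ((List.range k).map (pvRowS d n)) (x : Int) [] = pvRowS d n x := by
    intro x hx
    rw [PySem.List.pyGetD_natCast]
    exact PySem.List.getD_map_range _ _ _ _ hx
  have hP : ∀ x : Nat, x < k →
      PySem.List.pyGetD ((List.range k).map (pvRowP d n)) (x : Int) [] = pvRowP d n x := by
    intro x hx
    rw [PySem.List.pyGetD_natCast]
    exact PySem.List.getD_map_range _ _ _ _ hx
  unfold pvAcell
  rw [PySem.List.pyRange_zero_natCast k, List.map_map]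
  have hcands :
      (List.range k).map ((fun left : Int =>
          (left, PySem.List.pyGetD (PySem.List.pyGetD ((List.range k).map (pvRowS d n)) left []) (b : Int) 0
               + PySem.List.pyGetD (PySem.List.pyGetD ((List.range k).map (pvRowS d n)) ((k : Int) - left - 1) []) ((b : Int) + left + 1) 0))
          ∘ (fun x : Nat => (x : Int)))
        = (List.range k).map (fun x : Nat => ((x : Int),
            (pvBest d b x).1 + (pvBest d (b + x + 1) (k - x - 1)).1)) := by
    refine List.map_congr_left ?_
    intro x hx
    have hxk : x < k := List.mem_range.mp hx
    simp only [Function.comp_apply]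
    have e1 : (k : Int) - (x : Int) - 1 = ((k - x - 1 : Nat) : Int) := by omega
    have e2 : (b : Int) + (x : Int) + 1 = ((b + x + 1 : Nat) : Int) := by omega
    rw [hS x hxk, e1, hS (k - x - 1) (by omega), e2,
        hS2 x b hxk (by omega), hS2 (k - x - 1) (b + x + 1) (by omega) (by omega)]
  rw [hcands, pvBest_pos d b k (by omega)]
  simp only [pv_max?_map]
  cases hmax : PySem.List.max? (List.range k)
      (fun x => (pvBest d b x).1 + (pvBest d (b + x + 1) (k - x - 1)).1) with
  | none =>
    have := (PySem.List.max?_eq_none_iff _ _).mp hmax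
    simp [List.range_eq_nil] at this
    omega
  | some m =>
    have hmk : m < k := List.mem_range.mp (PySem.List.max?_mem hmax)
    simp only [Option.map_some, Option.getD_some]
    have e1 : (k : Int) - (m : Int) - 1 = ((k - m - 1 : Nat) : Int) := by omega
    have e2 : (b : Int) + (m : Int) + 1 = ((b + m + 1 : Nat) : Int) := by omega
    rw [hP m hmk, e1, hP (k - m - 1) (by omega), e2,
        hP2 m b hmk (by omega), hP2 (k - m - 1) (b + m + 1) (by omega) (by omega)]

-- A's inner loop builds row k
theorem pvArow_eq (d : PySem.Dict String Int) (n k : Nat) (hk : 1 ≤ k) (hkn : k < n) :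
    pvArow d ((List.range k).map (pvRowS d n)) ((List.range k).map (pvRowP d n))
        (n : Int) (k : Int) = (pvRowS d n k, pvRowP d n k) := by
  unfold pvArow
  have hnk : (n : Int) - (k : Int) = ((n - k : Nat) : Int) := by omega
  rw [hnk, PySem.List.pyRange_zero_natCast (n - k), List.foldl_map]
  dsimp only
  rw [pv_foldl_pair_append]
  have hcell : ∀ b' ∈ List.range (n - k),
      pvAcell d ((List.range k).map (pvRowS d n)) ((List.range k).map (pvRowP d n))
        (k : Int) (b' : Int) = pvBest d b' k := by
    intro b' hb'
    exact pvAcell_eq d n k b' hk (by have := List.mem_range.mp hb'; omega)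
  refine Prod.ext ?_ ?_
  · dsimp only
    rw [List.nil_append, pvRowS]
    refine List.map_congr_left ?_
    intro b' hb'
    rw [hcell b' hb']
  · dsimp only
    rw [List.nil_append, pvRowP]
    refine List.map_congr_left ?_
    intro b' hb'
    rw [hcell b' hb']

-- A's outer loop builds the whole table
theorem pv_outer (d : PySem.Dict String Int) (n : Nat) (hn : 1 ≤ n) (m : Nat)
    (hm : m ≤ n - 1) :
    ((List.range m).map (fun j => (1 : Int) + (j : Nat))).foldl
      (fun (st : List (List Int) × List (List (List String))) (level : Int) =>
        let r := pvArow d st.1 st.2 (n : Int) level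
        (st.1 ++ [r.1], st.2 ++ [r.2]))
      ([List.replicate n 0], [List.replicate n []])
      = ((List.range (m + 1)).map (pvRowS d n), (List.range (m + 1)).map (pvRowP d n)) := by
  have hB0 : ∀ b, pvBest d b 0 = ((0 : Int), ([] : List String)) := by
    intro b; rw [pvBest]; simp
  induction m with
  | zero =>
    simp only [List.range_zero, List.map_nil, List.foldl_nil]
    have h0S : pvRowS d n 0 = List.replicate n 0 := by
      rw [pvRowS]; simp [hB0]
    have h0P : pvRowP d n 0 = List.replicate n [] := by
      rw [pvRowP]; simp [hB0]
    simp [h0S, h0P]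
  | succ m ih =>
    have hm' : m ≤ n - 1 := by omega
    rw [List.range_succ, List.map_append, List.foldl_append, ih hm']
    simp only [List.map_cons, List.map_nil, List.foldl_cons, List.foldl_nil]
    have hc : (1 : Int) + (m : Nat) = ((m + 1 : Nat) : Int) := by omega
    rw [hc, pvArow_eq d n (m + 1) (by omega) (by omega)]
    rw [show List.range (m+1+1) = List.range (m+1) ++ [m+1] from List.range_succ, List.map_append, List.map_append]
    simp

-- xs[-1] on a non-empty list is its last element
theorem pv_pyGetD_last {α : Type} (ys : List α) (y d : α) :
    PySem.List.pyGetD (ys ++ [y]) (-1) d = y := by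
  simp [PySem.List.pyGetD, PySem.List.pyGet?, PySem.List.pyIdx?]

-- ===== VERDICT (by name: the statement is the Claim_ definition above) =====
theorem cyk_variant_spec : Claim_equal_cyk_variant := by
  intro ss length hdom hpre
  have hpre' : (1 : Int) ≤ length := hpre
  unfold Spec_cyk_variant cyk_variant cyk_variant_alt
  dsimp only
  obtain ⟨n, rfl⟩ : ∃ n : Nat, length = (n : Int) :=
    ⟨length.toNat, (Int.toNat_of_nonneg (by omega)).symm⟩
  have hn1 : 1 ≤ n := by omega
  have e1 : (((n : Int)) - 1).toNat = n - 1 := by omega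
  have e2 : ((n : Int)).toNat = n := by omega
  rw [e1, e2]
  -- B side
  have hok := pvBestM_ok (PySem.Dict.mk ss)
    (List.replicate n (List.replicate n none)) 0 (n - 1)
    (by
      intro b l v hv
      rw [List.getD_eq_getElem?_getD (l := List.replicate n (List.replicate n none)),
          List.getElem?_replicate] at hv
      by_cases hl : l < n
      · rw [if_pos hl] at hv
        simp only [Option.getD_some, List.getD_eq_getElem?_getD, List.getElem?_replicate] at hv
        by_cases hb : b < n
        · rw [if_pos hb] at hv; simp at hv
        · rw [if_neg hb] at hv; simp at hv
      · rw [if_neg hl] at hv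
        simp at hv)
  rw [hok.1]
  -- A side: the outer fold produces the full table
  rw [PySem.List.pyRange_one 1 (n : Int)]
  have e3 : ((n : Int) - 1).toNat = n - 1 := by omega
  rw [e3, pv_outer (PySem.Dict.mk ss) n hn1 (n - 1) (le_refl _)]
  have e4 : n - 1 + 1 = n := by omega
  rw [e4]
  dsimp only
  -- spans[-1][0]
  have hsplit : List.range n = List.range (n - 1) ++ [n - 1] := by
    conv_lhs => rw [show n = (n - 1) + 1 by omega]
    exact List.range_succ
  conv_lhs => rw [hsplit]
  rw [List.map_append, List.map_cons, List.map_nil, pv_pyGetD_last]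
  have hrow : pvRowP (PySem.Dict.mk ss) n (n - 1) = [(pvBest (PySem.Dict.mk ss) 0 (n - 1)).2] := by
    rw [pvRowP, show n - (n - 1) = 1 by omega, List.range_one, List.map_cons, List.map_nil]
  rw [hrow]
  simp [PySem.List.pyGetD, PySem.List.pyGet?, PySem.List.pyIdx?]
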